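-- pv_equiv track=rewrite | github.com/haolunc/ARC-RL | reference_solutions/solutions/91714a58.py | transform
-- ===== SOURCE A (Python) =====
-- def transform(grid):
--
--     n = len(grid)
--     m = len(grid[0]) if n else 0
--
--     best = None
--     best_area = 0
--
--     for top in range(n):
--         for left in range(m):
--             colour = grid[top][left]
--             if colour == 0:
--                 continue
--             for bottom in range(top, n):
--                 for right in range(left, m):
--                     area = (bottom - top + 1) * (right - left + 1)
--                     if area <= best_area:
--                         continue
--
--                     ok = True
--                     for i in range(top, bottom + 1):
--                         for j in range(left, right + 1):
--                             if grid[i][j] != colour: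
--                                 ok = False
--                                 break
--                         if not ok:
--                             break
--
--                     if ok:
--                         best = (top, left, bottom, right, colour)
--                         best_area = area
--
--     out = [[0] * m for _ in range(n)]
--     if best is not None:
--         top, left, bottom, right, colour = best
--         for i in range(top, bottom + 1):
--             for j in range(left, right + 1):
--                 out[i][j] = colour
--
--     return out
-- ===== SOURCE B (Python) =====
-- def transform(grid):
--     n = len(grid)
--     m = len(grid[0]) if n else 0
--
--     # run[i][j] = length of the run of equal values starting at (i, j) going right
--     runs = []
--     for row in grid:
--         L = len(row)
--         run = [0] * L
--         for j in range(L - 1, -1, -1):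
--             if j + 1 < L and row[j + 1] == row[j]:
--                 run[j] = run[j + 1] + 1
--             else:
--                 run[j] = 1
--         runs.append(run)
--
--     best = None
--     best_area = 0
--
--     for top in range(n):
--         for left in range(m):
--             c = grid[top][left]
--             if c == 0:
--                 continue
--             w = m - left
--             for bottom in range(top, n):
--                 if grid[bottom][left] != c:
--                     break
--                 if runs[bottom][left] < w:
--                     w = runs[bottom][left]
--                 area = (bottom - top + 1) * w
--                 if area > best_area:
--                     best = (top, left, bottom, left + w - 1, c)
--                     best_area = area
--
--     out = [[0] * m for _ in range(n)]
--     if best is not None: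
--         top, left, bottom, right, colour = best
--         for i in range(top, bottom + 1):
--             for j in range(left, right + 1):
--                 out[i][j] = colour
--     return out
-- ===== Notes on version B (the rewrite author's own statement) =====
-- stated objective: faster
-- what changed: A tests every (top,left,bottom,right) rectangle with an inner full cell scan (O(n^3 m^3) worst case); B precomputes per-row run lengths of equal values and, for each (top,left), sweeps down once keeping the running minimum run width, which collapses both the right loop and the uniformity scan (O(n^2 m) after an O(nm) DP).
import Mathlib
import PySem

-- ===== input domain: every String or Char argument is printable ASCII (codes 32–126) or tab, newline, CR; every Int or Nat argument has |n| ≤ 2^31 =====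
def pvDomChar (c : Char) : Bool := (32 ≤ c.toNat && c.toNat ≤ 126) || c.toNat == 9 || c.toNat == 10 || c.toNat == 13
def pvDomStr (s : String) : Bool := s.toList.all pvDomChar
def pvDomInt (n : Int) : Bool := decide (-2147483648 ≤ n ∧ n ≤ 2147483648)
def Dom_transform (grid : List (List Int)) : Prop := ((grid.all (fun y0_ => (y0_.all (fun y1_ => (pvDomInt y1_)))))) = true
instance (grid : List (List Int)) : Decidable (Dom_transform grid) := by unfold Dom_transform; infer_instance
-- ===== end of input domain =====

-- B replaces A's O(n^3·m^3) brute-force rectangle scan by a run-length DP: per row the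
-- length of the equal-value run starting at each cell, then for each (top,left) one
-- downward sweep maintaining the running minimum run width — O(n^2·m) after O(n·m) DP.
-- Both Pythons only fill a fresh output grid; neither mutates its argument.

-- ===== PORT A =====
-- rendering of the final zero grid with the best rectangle drawn in (identical code at
-- the end of both Pythons, hence one shared helper)
def pvRender (n m : Nat) (best : Option (Nat × Nat × Nat × Nat × Int)) : List (List Int) :=
  match best with
  | none => (List.range n).map (fun _ => (List.range m).map (fun _ => (0:Int)))
  | some (t, l, b, r, c) =>
      (List.range n).map (fun i => (List.range m).map (fun j =>
        if t ≤ i ∧ i ≤ b ∧ l ≤ j ∧ j ≤ r then c else 0))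

def transform (grid : List (List Int)) : List (List Int) :=
  let n := grid.length
  let m := if n = 0 then 0 else (grid.headD []).length
  let cell : Nat → Nat → Int := fun i j => (grid.getD i []).getD j 0
  let st : Option (Nat × Nat × Nat × Nat × Int) × Nat :=
    (List.range n).foldl (fun st top =>
      (List.range m).foldl (fun st left =>
        let colour := cell top left
        if colour = 0 then st else
        (List.range' top (n - top)).foldl (fun st bottom =>
          (List.range' left (m - left)).foldl (fun st right =>
            let area := (bottom - top + 1) * (right - left + 1)
            if area ≤ st.2 then st else
            let ok := (List.range' top (bottom + 1 - top)).all (fun i =>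
              (List.range' left (right + 1 - left)).all (fun j => cell i j == colour))
            if ok then (some (top, left, bottom, right, colour), area) else st) st) st) st)
      ((none, 0) : Option (Nat × Nat × Nat × Nat × Int) × Nat)
  pvRender n m st.1

-- ===== PORT B =====
-- run[j] = length of the run of equal values starting at position j (right-to-left DP)
def runRow : List Int → List Nat
  | [] => []
  | x :: rest =>
    let r := runRow rest
    (match rest, r with
     | y :: _, k :: _ => if y == x then k + 1 else 1
     | _, _ => 1) :: r

-- the `for bottom in range(top, n)` loop of B, with its `break` and running min width
def pvLoopB (cellCol : Nat → Int) (runCol : Nat → Nat) (t l : Nat) (c : Int) :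
    List Nat → Nat → Option (Nat × Nat × Nat × Nat × Int) × Nat →
      Option (Nat × Nat × Nat × Nat × Int) × Nat
  | [], _, st => st
  | b :: bs, w, st =>
    if cellCol b ≠ c then st else
    let w' := if runCol b < w then runCol b else w
    let area := (b - t + 1) * w'
    let st' := if st.2 < area then (some (t, l, b, l + w' - 1, c), area) else st
    pvLoopB cellCol runCol t l c bs w' st'

def transform_alt (grid : List (List Int)) : List (List Int) :=
  let n := grid.length
  let m := if n = 0 then 0 else (grid.headD []).length
  let runs := grid.map runRow
  let cell : Nat → Nat → Int := fun i j => (grid.getD i []).getD j 0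
  let runAt : Nat → Nat → Nat := fun i j => (runs.getD i []).getD j 0
  let st : Option (Nat × Nat × Nat × Nat × Int) × Nat :=
    (List.range n).foldl (fun st top =>
      (List.range m).foldl (fun st left =>
        let c := cell top left
        if c = 0 then st else
        pvLoopB (fun b => cell b left) (fun b => runAt b left) top left c
          (List.range' top (n - top)) (m - left) st) st)
      ((none, 0) : Option (Nat × Nat × Nat × Nat × Int) × Nat)
  pvRender n m st.1

-- ===== PRECONDITION & SPEC =====
-- Pre_ excludes exactly the ragged grids on which A raises IndexError: A reads
-- grid[top][left] for every top < n, left < len(grid[0]), so it raises iff some row is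
-- shorter than row 0 (rows longer than row 0 are fine: their extra cells are ignored).
def Pre_transform (grid : List (List Int)) : Prop :=
  ∀ row ∈ grid, (grid.headD []).length ≤ row.length
instance (grid : List (List Int)) : Decidable (Pre_transform grid) := by
  unfold Pre_transform; infer_instance

def pvWitness_transform : List (List Int) := [[1, 0], [2, 2]]

def Spec_transform (grid : List (List Int)) (out : List (List Int)) : Prop := out = transform_alt grid
instance (grid : List (List Int)) (out : List (List Int)) : Decidable (Spec_transform grid out) := by unfold Spec_transform; infer_instance

-- ===== CLAIM (what is proved, stated in full; the proofs are below) =====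
def Claim_equal_transform : Prop := ∀ (grid : List (List Int)), Dom_transform grid → Pre_transform grid → Spec_transform grid (transform grid)

-- ===== LEMMAS AND PROOFS =====

-- abbreviations used only by the proofs
def pvCell (row : Nat → List Int) (i j : Nat) : Int := (row i).getD j 0
def pvRun (row : Nat → List Int) (i j : Nat) : Nat := (runRow (row i)).getD j 0
-- running min of run widths over rows t, t+1, …, t+k-1, started at `init`
def pvW (row : Nat → List Int) (t l init k : Nat) : Nat :=
  (List.range' t k).foldl (fun w i => if pvRun row i l < w then pvRun row i l else w) init
-- "column l equals c on rows t..b"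
def pvColB (row : Nat → List Int) (t l b : Nat) (c : Int) : Bool :=
  (List.range' t (b + 1 - t)).all (fun i => pvCell row i l == c)
-- A's innermost (right) step
def pvStepR (row : Nat → List Int) (t l b : Nat) (c : Int)
    (st : Option (Nat × Nat × Nat × Nat × Int) × Nat) (r : Nat) :
    Option (Nat × Nat × Nat × Nat × Int) × Nat :=
  let area := (b - t + 1) * (r - l + 1)
  if area ≤ st.2 then st else
  let ok := (List.range' t (b + 1 - t)).all (fun i =>
    (List.range' l (r + 1 - l)).all (fun j => pvCell row i j == c))
  if ok then (some (t, l, b, r, c), area) else st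
-- the collapsed effect of A's whole right-loop for one bottom b
def pvGA (row : Nat → List Int) (m t l : Nat) (c : Int)
    (st : Option (Nat × Nat × Nat × Nat × Int) × Nat) (b : Nat) :
    Option (Nat × Nat × Nat × Nat × Int) × Nat :=
  let W := pvW row t l (m - l) (b + 1 - t)
  if pvColB row t l b c && decide (st.2 < (b - t + 1) * W)
  then (some (t, l, b, l + W - 1, c), (b - t + 1) * W) else st

theorem pv_getD_headD_drop {α : Type} (xs : List α) (j : Nat) (d : α) :
    xs.getD j d = (xs.drop j).headD d := by
  induction xs generalizing j with
  | nil => cases j <;> rfl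
  | cons x t ih => cases j with
    | zero => rfl
    | succ k => simp

theorem pv_getD_drop {α : Type} (xs : List α) (n k : Nat) (d : α) :
    (xs.drop n).getD k d = xs.getD (n + k) d := by
  induction xs generalizing n with
  | nil => cases n <;> rfl
  | cons x t ih => cases n with
    | zero => simp
    | succ j => simp [Nat.succ_add]

theorem runRow_drop (xs : List Int) (j : Nat) :
    (runRow xs).drop j = runRow (xs.drop j) := by
  induction xs generalizing j with
  | nil => simp [runRow]
  | cons x t ih => cases j with
    | zero => rfl
    | succ k => simpa [runRow] using ih k

theorem runRow_cons_cons (x y : Int) (r : List Int) :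
    runRow (x :: y :: r)
      = (if y == x then (runRow (y :: r)).headD 0 + 1 else 1) :: runRow (y :: r) := rfl

theorem runRow_headD (xs : List Int) :
    (runRow xs).headD 0 = (xs.takeWhile (· == xs.headD 0)).length := by
  induction xs with
  | nil => rfl
  | cons x t ih =>
    cases t with
    | nil => simp [runRow, List.takeWhile]
    | cons y r =>
      rw [runRow_cons_cons]
      by_cases h : y = x
      · subst h
        simp only [List.headD_cons, BEq.rfl, if_true]
        rw [ih]
        simp
      · have hb : (y == x) = false := by simp [h]
        simp [hb]

theorem pv_takeWhile_len {p : Int → Bool} (xs : List Int) (k : Nat) (hk : k ≤ xs.length) :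
    k ≤ (xs.takeWhile p).length ↔ ∀ d < k, p (xs.getD d 0) := by
  induction xs generalizing k with
  | nil =>
    have : k = 0 := by simpa using hk
    subst this; simp
  | cons x t ih =>
    cases k with
    | zero => simp
    | succ j =>
      by_cases hp : p x
      · simp only [List.takeWhile, hp, List.length_cons, Nat.succ_le_succ_iff]
        rw [ih j (by simpa using hk)]
        constructor
        · intro h d hd
          cases d with
          | zero => simpa using hp
          | succ e => simpa using h e (by omega)
        · intro h d hd
          simpa using h (d + 1) (by omega)
      · simp only [List.takeWhile, hp]
        constructor
        · intro h
          exact absurd h (by simp)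
        · intro h
          exact absurd (by simpa using h 0 (by omega)) hp

-- pvRun is exactly "how far the colour of (i,l) extends to the right"
theorem pvRun_ge (row : Nat → List Int) (i l k : Nat) (hk : l + k ≤ (row i).length) :
    k ≤ pvRun row i l ↔ ∀ d < k, pvCell row i (l + d) = pvCell row i l := by
  have h1 : pvRun row i l = ((row i).drop l |>.takeWhile (· == pvCell row i l)).length := by
    unfold pvRun
    rw [pv_getD_headD_drop, runRow_drop, runRow_headD]
    unfold pvCell
    rw [pv_getD_headD_drop]
  rw [h1, pv_takeWhile_len _ k (by simp; omega)]
  constructor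
  · intro h d hd
    have := h d hd
    rw [pv_getD_drop] at this
    simpa [pvCell, beq_iff_eq] using this
  · intro h d hd
    rw [pv_getD_drop]
    simpa [pvCell, beq_iff_eq] using h d hd

theorem pv_le_minfold (g : Nat → Nat) (L : List Nat) (a k : Nat) :
    k ≤ L.foldl (fun w i => if g i < w then g i else w) a ↔ (k ≤ a ∧ ∀ i ∈ L, k ≤ g i) := by
  induction L generalizing a with
  | nil => simp
  | cons x t ih =>
    simp only [List.foldl_cons, List.mem_cons]
    rw [ih]
    constructor
    · rintro ⟨h1, h2⟩
      split at h1 <;>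
        exact ⟨by omega, fun i hi => hi.elim (fun e => e ▸ by omega) (h2 i)⟩
    · rintro ⟨h1, h2⟩
      have := h2 x (Or.inl rfl)
      exact ⟨by split <;> omega, fun i hi => h2 i (Or.inr hi)⟩

theorem pv_minfold_le_init (g : Nat → Nat) (L : List Nat) (a : Nat) :
    L.foldl (fun w i => if g i < w then g i else w) a ≤ a :=
  ((pv_le_minfold g L a _).mp le_rfl).1

theorem pv_foldl_id_of_mem {α β : Type} (f : β → α → β) (L : List α) (s : β)
    (h : ∀ x ∈ L, ∀ st, f st x = st) : L.foldl f s = s := by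
  induction L generalizing s with
  | nil => rfl
  | cons x t ih =>
    rw [List.foldl_cons, h x (by simp)]
    exact ih _ (fun y hy st => h y (by simp [hy]) st)

-- A's uniformity check, characterised by the column test and the min run width
theorem pv_ok_eq (row : Nat → List Int) (m t l b r : Nat) (c : Int)
    (hr : r < m) (hl : l ≤ r) (hb : t ≤ b)
    (hrow : ∀ i, t ≤ i → i ≤ b → m ≤ (row i).length) :
    ((List.range' t (b + 1 - t)).all (fun i =>
        (List.range' l (r + 1 - l)).all (fun j => pvCell row i j == c)))
      = (pvColB row t l b c && decide (r + 1 - l ≤ pvW row t l (m - l) (b + 1 - t))) := by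
  unfold pvColB pvW
  rw [Bool.eq_iff_iff]
  simp only [Bool.and_eq_true, List.all_eq_true, List.mem_range'_1, decide_eq_true_eq,
    beq_iff_eq, and_imp]
  rw [pv_le_minfold]
  simp only [List.mem_range'_1, and_imp]
  constructor
  · intro h
    refine ⟨fun i hi1 hi2 => h i hi1 hi2 l (by omega) (by omega),
            by omega, fun i hi1 hi2 => ?_⟩
    rw [pvRun_ge row i l (r + 1 - l) (by have := hrow i hi1 (by omega); omega)]
    intro e he
    rw [h i hi1 hi2 (l + e) (by omega) (by omega), h i hi1 hi2 l (by omega) (by omega)]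
  · rintro ⟨hcol, -, hruns⟩ i hi1 hi2 j hj1 hj2
    have hcl := hcol i hi1 hi2
    have hrun := hruns i hi1 hi2
    rw [pvRun_ge row i l (r + 1 - l) (by have := hrow i hi1 (by omega); omega)] at hrun
    have := hrun (j - l) (by omega)
    rw [show l + (j - l) = j by omega] at this
    rw [this, hcl]

-- the right-loop restricted to admissible widths, collapsed to its final state
theorem pv_foldl_incr (t l b k : Nat) (c : Int) (st : Option (Nat × Nat × Nat × Nat × Int) × Nat) :
    (List.range' l k).foldl (fun st r =>
        if (b - t + 1) * (r - l + 1) ≤ st.2 then st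
        else (some (t, l, b, r, c), (b - t + 1) * (r - l + 1))) st
      = if st.2 < (b - t + 1) * k then (some (t, l, b, l + k - 1, c), (b - t + 1) * k) else st := by
  induction k with
  | zero => simp
  | succ j ih =>
    rw [List.range'_1_concat, List.foldl_append, ih]
    simp only [List.foldl_cons, List.foldl_nil]
    have harea : l + j - l + 1 = j + 1 := by omega
    have hupd : l + (j + 1) - 1 = l + j := by omega
    have hmul : (b - t + 1) * j < (b - t + 1) * (j + 1) := by nlinarith
    by_cases h1 : st.2 < (b - t + 1) * j
    · have h2 : st.2 < (b - t + 1) * (j + 1) := by omega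
      rw [if_pos h1]
      simp only [harea]
      rw [if_neg (Nat.not_le.mpr hmul), if_pos h2, hupd]
    · rw [if_neg h1]
      simp only [harea]
      by_cases h2 : st.2 < (b - t + 1) * (j + 1)
      · rw [if_neg (Nat.not_le.mpr h2), if_pos h2, hupd]
      · rw [if_pos (Nat.not_lt.mp h2), if_neg h2]

-- A's whole right-loop for one bottom equals the collapsed step pvGA
theorem pv_rights_eq_GA (row : Nat → List Int) (m t l b : Nat) (c : Int)
    (hb : t ≤ b) (hl : l < m)
    (hrow : ∀ i, t ≤ i → i ≤ b → m ≤ (row i).length)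
    (st : Option (Nat × Nat × Nat × Nat × Int) × Nat) :
    (List.range' l (m - l)).foldl (pvStepR row t l b c) st = pvGA row m t l c st b := by
  by_cases hcol : pvColB row t l b c = true
  · -- split the rights at the max admissible width W
    set W := pvW row t l (m - l) (b + 1 - t) with hW
    have hWle : W ≤ m - l := pv_minfold_le_init _ _ _
    have hsplit : List.range' l (m - l) = List.range' l W ++ List.range' (l + W) (m - l - W) := by
      rw [List.range'_append_1]
      congr 1
      omega
    rw [hsplit, List.foldl_append]
    have h1 : (List.range' l W).foldl (pvStepR row t l b c) st
        = (List.range' l W).foldl (fun st r =>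
            if (b - t + 1) * (r - l + 1) ≤ st.2 then st
            else (some (t, l, b, r, c), (b - t + 1) * (r - l + 1))) st := by
      apply PySem.List.foldl_congr_mem
      intro acc r hrm
      rw [List.mem_range'_1] at hrm
      have hok : ((List.range' t (b + 1 - t)).all (fun i =>
          (List.range' l (r + 1 - l)).all (fun j => pvCell row i j == c))) = true := by
        rw [pv_ok_eq row m t l b r c (by omega) (by omega) hb hrow]
        simp only [hcol, Bool.true_and, decide_eq_true_eq, ← hW]
        omega
      simp only [pvStepR, hok, if_true]
    rw [h1, pv_foldl_incr]
    have h2 : ∀ x ∈ List.range' (l + W) (m - l - W), ∀ st',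
        pvStepR row t l b c st' x = st' := by
      intro r hrm st'
      rw [List.mem_range'_1] at hrm
      have hok : ((List.range' t (b + 1 - t)).all (fun i =>
          (List.range' l (r + 1 - l)).all (fun j => pvCell row i j == c))) = false := by
        rw [pv_ok_eq row m t l b r c (by omega) (by omega) hb hrow]
        simp only [Bool.and_eq_false_iff, decide_eq_false_iff_not, ← hW]
        right; omega
      simp only [pvStepR, hok, Bool.false_eq_true, if_false]
      split <;> rfl
    rw [pv_foldl_id_of_mem _ _ _ h2]
    have hGA : pvGA row m t l c st b
        = if st.2 < (b - t + 1) * W then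
            (some (t, l, b, l + W - 1, c), (b - t + 1) * W) else st := by
      simp only [pvGA, ← hW, hcol, Bool.true_and, decide_eq_true_eq]
    rw [hGA]
  · -- some column cell differs: every right step is the identity
    rw [pv_foldl_id_of_mem]
    · simp [pvGA, hcol]
    · intro r hrm st'
      rw [List.mem_range'_1] at hrm
      have hok : ((List.range' t (b + 1 - t)).all (fun i =>
          (List.range' l (r + 1 - l)).all (fun j => pvCell row i j == c))) = false := by
        rw [pv_ok_eq row m t l b r c (by omega) (by omega) hb hrow]
        simp [hcol]
      simp only [pvStepR, hok, Bool.false_eq_true, if_false]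
      split <;> rfl

theorem pv_colB_false (row : Nat → List Int) (t l b0 b : Nat) (c : Int)
    (h1 : t ≤ b0) (h2 : b0 ≤ b) (h3 : pvCell row b0 l ≠ c) :
    pvColB row t l b c = false := by
  unfold pvColB
  rw [Bool.eq_false_iff]
  intro hall
  rw [List.all_eq_true] at hall
  exact h3 (by simpa [beq_iff_eq] using hall b0 (List.mem_range'_1.mpr ⟨h1, by omega⟩))

theorem pv_colB_true (row : Nat → List Int) (t l b0 : Nat) (c : Int)
    (h1 : t ≤ b0)
    (hpre : ∀ i, t ≤ i → i < b0 → pvCell row i l = c) (hb0 : pvCell row b0 l = c) :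
    pvColB row t l b0 c = true := by
  unfold pvColB
  rw [List.all_eq_true]
  intro i hi
  rw [List.mem_range'_1] at hi
  rcases Nat.lt_or_ge i b0 with h | h
  · simpa [beq_iff_eq] using hpre i hi.1 h
  · have : i = b0 := by omega
    simpa [beq_iff_eq, this] using hb0

-- B's bottom loop computes the fold of the collapsed steps pvGA
theorem pv_loopB_eq_GA (row : Nat → List Int) (m t l : Nat) (c : Int) :
    ∀ (k b0 : Nat) (st : Option (Nat × Nat × Nat × Nat × Int) × Nat),
      t ≤ b0 →
      (∀ i, t ≤ i → i < b0 → pvCell row i l = c) →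
      pvLoopB (fun b => pvCell row b l) (fun b => pvRun row b l) t l c
          (List.range' b0 k) (pvW row t l (m - l) (b0 - t)) st
        = (List.range' b0 k).foldl (pvGA row m t l c) st := by
  intro k
  induction k with
  | zero => intro b0 st _ _; rfl
  | succ j ih =>
    intro b0 st hb0 hpre
    rw [List.range'_succ]
    by_cases hc : pvCell row b0 l = c
    · have hstep : pvW row t l (m - l) (b0 + 1 - t)
          = (if pvRun row b0 l < pvW row t l (m - l) (b0 - t)
             then pvRun row b0 l else pvW row t l (m - l) (b0 - t)) := by
        unfold pvW
        have : b0 + 1 - t = (b0 - t) + 1 := by omega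
        rw [this, List.range'_1_concat, List.foldl_append]
        have : t + (b0 - t) = b0 := by omega
        rw [this]
        rfl
      simp only [pvLoopB, hc, ne_eq, not_true_eq_false, if_false, List.foldl_cons]
      rw [← hstep]
      have hGA : pvGA row m t l c st b0
          = (if st.2 < (b0 - t + 1) * pvW row t l (m - l) (b0 + 1 - t)
             then (some (t, l, b0, l + pvW row t l (m - l) (b0 + 1 - t) - 1, c),
                   (b0 - t + 1) * pvW row t l (m - l) (b0 + 1 - t))
             else st) := by
        unfold pvGA
        rw [pv_colB_true row t l b0 c hb0 hpre hc]
        simp only [Bool.true_and, decide_eq_true_eq]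
      rw [hGA]
      have hnext : pvW row t l (m - l) (b0 + 1 - t) = pvW row t l (m - l) ((b0 + 1) - t) := rfl
      have := ih (b0 + 1)
        (if st.2 < (b0 - t + 1) * pvW row t l (m - l) (b0 + 1 - t)
         then (some (t, l, b0, l + pvW row t l (m - l) (b0 + 1 - t) - 1, c),
               (b0 - t + 1) * pvW row t l (m - l) (b0 + 1 - t))
         else st)
        (by omega)
        (fun i h1 h2 => by
          rcases Nat.lt_or_ge i b0 with h | h
          · exact hpre i h1 h
          · have : i = b0 := by omega
            rwa [this])
      rw [← this]
    · -- break: column cell differs, and every later pvGA step is the identity too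
      simp only [pvLoopB, hc, ne_eq, not_false_eq_true, if_true]
      rw [pv_foldl_id_of_mem _ _ _ (fun b hb st' => by
        have hble : b0 ≤ b := by
          rcases List.mem_cons.mp hb with rfl | h
          · exact le_rfl
          · rw [List.mem_range'_1] at h; omega
        unfold pvGA
        rw [pv_colB_false row t l b0 b c hb0 hble hc]
        simp)]

-- the whole (bottom, right) nest of A for one (top,left) equals B's loop
theorem pv_tl_eq (row : Nat → List Int) (n m t l : Nat) (c : Int)
    (ht : t ≤ n) (hl : l < m)
    (hrow : ∀ i, i < n → m ≤ (row i).length)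
    (st : Option (Nat × Nat × Nat × Nat × Int) × Nat) :
    (List.range' t (n - t)).foldl (fun st b =>
        (List.range' l (m - l)).foldl (pvStepR row t l b c) st) st
      = pvLoopB (fun b => pvCell row b l) (fun b => pvRun row b l) t l c
          (List.range' t (n - t)) (m - l) st := by
  have h1 : (List.range' t (n - t)).foldl (fun st b =>
      (List.range' l (m - l)).foldl (pvStepR row t l b c) st) st
      = (List.range' t (n - t)).foldl (pvGA row m t l c) st := by
    apply PySem.List.foldl_congr_mem
    intro acc b hb
    rw [List.mem_range'_1] at hb
    exact pv_rights_eq_GA row m t l b c hb.1 hl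
      (fun i h1 h2 => hrow i (by omega)) acc
  rw [h1, ← pv_loopB_eq_GA row m t l c (n - t) t st le_rfl (fun i h1 h2 => absurd h1 (by omega))]
  have : pvW row t l (m - l) (t - t) = m - l := by
    unfold pvW
    simp
  rw [this]

theorem pv_getD_map_runRow (grid : List (List Int)) (i : Nat) :
    (grid.map runRow).getD i [] = runRow (grid.getD i []) := by
  induction grid generalizing i with
  | nil => cases i <;> rfl
  | cons x t ih => cases i with
    | zero => rfl
    | succ j => simpa using ih j

theorem pv_row_len (grid : List (List Int)) (hpre : Pre_transform grid)
    (i : Nat) (hi : i < grid.length) :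
    (if grid.length = 0 then 0 else (grid.headD []).length) ≤ (grid.getD i []).length := by
  have hmem : grid.getD i [] ∈ grid := by
    rw [List.getD_eq_getElem _ _ hi]
    exact List.getElem_mem hi
  have := hpre _ hmem
  split
  · omega
  · exact this

-- ===== VERDICT (by name: the statement is the Claim_ definition above) =====
theorem transform_spec : Claim_equal_transform := by
  intro grid _ hpre
  unfold Spec_transform transform transform_alt
  simp only []
  set n := grid.length with hn
  set m := (if n = 0 then 0 else (grid.headD []).length) with hm
  set row : Nat → List Int := fun i => grid.getD i [] with hrowdef
  congr 1
  refine congrArg Prod.fst ?_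
  apply PySem.List.foldl_congr_mem
  intro acc t htm
  rw [List.mem_range] at htm
  apply PySem.List.foldl_congr_mem
  intro acc2 l hlm
  rw [List.mem_range] at hlm
  by_cases hc : (grid.getD t []).getD l 0 = 0
  · rw [if_pos hc, if_pos hc]
  · rw [if_neg hc, if_neg hc]
    have hruns : (fun b => ((List.map runRow grid).getD b []).getD l 0)
        = (fun b => pvRun row b l) := by
      funext b
      rw [pv_getD_map_runRow]
      rfl
    rw [hruns]
    exact pv_tl_eq row n m t l ((grid.getD t []).getD l 0) (by omega) hlm
      (fun i hi => pv_row_len grid hpre i hi) acc2
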